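-- pv_equiv track=rewrite | github.com/GreenwichandBarrow/Sapling | dashboard/pages/c_suite_skills.py | _expand_intervals
-- ===== SOURCE A (Python) =====
-- def _expand_intervals(intervals: list[dict]) -> dict[int, list[tuple[int, int]]]:
--     """Return {iso_weekday: [(hour, minute), ...]} for one skill's plist."""
--     by_day: dict[int, list[tuple[int, int]]] = {}
--     for d in intervals:
--         h = d.get("Hour", 0)
--         m = d.get("Minute", 0)
--         wd = d.get("Weekday")
--         if wd is None:
--             for day in range(1, 8):
--                 by_day.setdefault(day, []).append((h, m))
--         else:
--             wd_norm = 7 if wd == 0 else wd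
--             by_day.setdefault(wd_norm, []).append((h, m))
--     return {d: sorted(t) for d, t in by_day.items() if t}
-- ===== SOURCE B (Python) =====
-- def _expand_intervals(intervals: list[dict]) -> dict[int, list[tuple[int, int]]]:
--     """Return {iso_weekday: [(hour, minute), ...]} for one skill's plist."""
--     # Phase 1: distinct normalized weekday keys, in first-appearance order.
--     keys: list[int] = []
--     for d in intervals:
--         wd = d.get("Weekday")
--         for k in (range(1, 8) if wd is None else [7 if wd == 0 else wd]):
--             if k not in keys:
--                 keys.append(k)
--     # Phase 2: one filtering scan of the intervals per key builds its sorted bucket.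
--     return {k: sorted((d.get("Hour", 0), d.get("Minute", 0))
--                       for d in intervals
--                       if (d.get("Weekday") is None and 1 <= k <= 7)
--                          or (d.get("Weekday") is not None
--                              and (7 if d["Weekday"] == 0 else d["Weekday"]) == k))
--             for k in keys}
-- ===== Notes on version B (the rewrite author's own statement) =====
-- stated objective: alternative
-- what changed: A makes one scatter pass mutating per-day dict buckets via setdefault/append and then sorts each bucket; B first collects the distinct normalized weekday keys in first-appearance order, then builds each key's sorted bucket by an independent filtering scan of the intervals.
import Mathlib
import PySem

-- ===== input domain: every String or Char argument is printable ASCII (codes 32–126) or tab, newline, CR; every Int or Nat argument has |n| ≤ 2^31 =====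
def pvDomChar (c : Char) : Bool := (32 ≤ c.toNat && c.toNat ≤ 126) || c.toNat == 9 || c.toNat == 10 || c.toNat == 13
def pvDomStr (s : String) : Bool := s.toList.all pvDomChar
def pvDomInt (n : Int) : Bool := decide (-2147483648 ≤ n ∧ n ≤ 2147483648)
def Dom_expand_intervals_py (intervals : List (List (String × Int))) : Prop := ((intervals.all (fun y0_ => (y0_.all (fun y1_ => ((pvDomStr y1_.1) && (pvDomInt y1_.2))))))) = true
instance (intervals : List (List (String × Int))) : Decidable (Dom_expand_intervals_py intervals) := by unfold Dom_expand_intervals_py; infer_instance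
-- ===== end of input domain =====

-- B replaces A's single bucket-mutating scatter pass by a keys-then-per-key-scan decomposition (alternative, same cost class).

-- shared accessors: d.get("Hour", 0), d.get("Minute", 0), d.get("Weekday")
def pvHour (d : List (String × Int)) : Int := (PySem.Dict.mk d).getD "Hour" 0
def pvMinute (d : List (String × Int)) : Int := (PySem.Dict.mk d).getD "Minute" 0
def pvWd (d : List (String × Int)) : Option Int := (PySem.Dict.mk d).get? "Weekday"

-- ===== PORT A =====
-- body of A's 'for d in intervals' loop
def pvStepA (bd : PySem.Dict Int (List (Int × Int))) (d : List (String × Int)) :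
    PySem.Dict Int (List (Int × Int)) :=
  let h := pvHour d
  let m := pvMinute d
  match pvWd d with
  | none =>
      (PySem.List.pyRange 1 8 1).foldl (fun bd day => bd.modify day [] (· ++ [(h, m)])) bd
  | some wd =>
      let wd_norm : Int := if wd = 0 then 7 else wd
      bd.modify wd_norm [] (· ++ [(h, m)])

def expand_intervals_py (intervals : List (List (String × Int))) : List (Int × List (Int × Int)) :=
  -- by_day, then {d: sorted(t) for d, t in by_day.items() if t}  (keys of by_day are distinct)
  (((intervals.foldl pvStepA PySem.Dict.empty).items.filter (fun p => !p.2.isEmpty)).map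
    (fun p => (p.1, PySem.List.sorted2 p.2 (·.1) (·.2))))

-- ===== PORT B =====
-- 'range(1, 8) if wd is None else [7 if wd == 0 else wd]'
def pvKset (d : List (String × Int)) : List Int :=
  match pvWd d with
  | none => PySem.List.pyRange 1 8 1
  | some wd => [if wd = 0 then 7 else wd]

-- the comprehension's filter condition for key k
def pvMatches (k : Int) (d : List (String × Int)) : Bool :=
  match pvWd d with
  | none => decide (1 ≤ k ∧ k ≤ 7)
  | some wd => decide ((if wd = 0 then 7 else wd) = k)

def expand_intervals_py_alt (intervals : List (List (String × Int))) : List (Int × List (Int × Int)) :=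
  -- keys (a Set built by the phase-1 loop), then the phase-2 dict comprehension over keys
  (intervals.foldl (fun s d => (pvKset d).foldl PySem.Set.add s) (PySem.Set.empty : PySem.Set Int)).map (fun k =>
    (k, PySem.List.sorted2
          ((intervals.filter (pvMatches k)).map (fun d => (pvHour d, pvMinute d)))
          (·.1) (·.2)))

-- ===== PRECONDITION & SPEC =====
def Spec_expand_intervals_py (intervals : List (List (String × Int))) (out : List (Int × List (Int × Int))) : Prop := out = expand_intervals_py_alt intervals
instance (intervals : List (List (String × Int))) (out : List (Int × List (Int × Int))) : Decidable (Spec_expand_intervals_py intervals out) := by unfold Spec_expand_intervals_py; infer_instance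

-- ===== CLAIM (what is proved, stated in full; the proofs are below) =====
def Claim_equal_expand_intervals_py : Prop := ∀ (intervals : List (List (String × Int))), Dom_expand_intervals_py intervals → Spec_expand_intervals_py intervals (expand_intervals_py intervals)

-- ===== LEMMAS AND PROOFS =====

-- the flat list of (key, (hour, minute)) pairs A's nested loop appends, in order
def pvFlat (intervals : List (List (String × Int))) : List (Int × (Int × Int)) :=
  intervals.flatMap (fun d => (pvKset d).map (fun j => (j, (pvHour d, pvMinute d))))

-- a nested fold is the fold of the flattened list
theorem pv_foldl_nested {α β γ : Type} (l : List α) (g : α → List β) (f : γ → β → γ) (i : γ) :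
    l.foldl (fun a x => (g x).foldl f a) i = (l.flatMap g).foldl f i := by
  induction l generalizing i with
  | nil => rfl
  | cons x t ih => simp [List.foldl, ih, List.foldl_append]

theorem pvStepA_flat (bd : PySem.Dict Int (List (Int × Int))) (d : List (String × Int)) :
    pvStepA bd d = ((pvKset d).map (fun j => (j, (pvHour d, pvMinute d)))).foldl
      (fun bd p => bd.modify p.1 [] (· ++ [p.2])) bd := by
  unfold pvStepA pvKset
  cases pvWd d with
  | none => simp [List.foldl_map]
  | some wd => simp [List.foldl]

theorem pv_byday_eq (intervals : List (List (String × Int))) :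
    intervals.foldl pvStepA PySem.Dict.empty =
      (pvFlat intervals).foldl (fun bd p => bd.modify p.1 [] (· ++ [p.2])) PySem.Dict.empty := by
  unfold pvFlat
  rw [← pv_foldl_nested]
  exact PySem.List.foldl_congr_mem intervals _ _ _ (fun acc x _ => pvStepA_flat acc x)

theorem pv_kset_mem (k : Int) (d : List (String × Int)) : (k ∈ pvKset d) ↔ pvMatches k d = true := by
  unfold pvKset pvMatches
  cases pvWd d with
  | none =>
      rw [PySem.List.mem_pyRange_one]
      simp; omega
  | some wd => simp [eq_comm]

theorem pv_kset_nodup (d : List (String × Int)) : (pvKset d).Nodup := by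
  unfold pvKset
  cases pvWd d with
  | none => decide
  | some wd => simp

-- the per-key bucket A accumulates equals B's filtering scan
theorem pv_bucket_eq (intervals : List (List (String × Int))) (k : Int) :
    ((pvFlat intervals).filter (fun p => p.1 == k)).map (·.2) =
      (intervals.filter (pvMatches k)).map (fun d => (pvHour d, pvMinute d)) := by
  induction intervals with
  | nil => rfl
  | cons d t ih =>
      unfold pvFlat
      simp only [List.flatMap_cons, List.filter_append, List.map_append]
      rw [List.filter_map]
      have hfil : (pvKset d).filter ((fun p => p.1 == k) ∘ (fun j => (j, (pvHour d, pvMinute d)))) =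
          if pvMatches k d then [k] else [] := by
        have : ((fun p => p.1 == k) ∘ (fun j : Int => (j, (pvHour d, pvMinute d)))) = (· == k) := rfl
        rw [this, List.filter_beq]
        by_cases hm : k ∈ pvKset d
        · rw [List.count_eq_one_of_mem (pv_kset_nodup d) hm]
          simp [(pv_kset_mem k d).mp hm]
        · rw [List.count_eq_zero.mpr hm]
          have : pvMatches k d = false := by
            cases h : pvMatches k d
            · rfl
            · exact absurd ((pv_kset_mem k d).mpr h) hm
          simp [this]
      rw [hfil]
      unfold pvFlat at ih
      cases hm : pvMatches k d with
      | true => simp [hm, ih]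
      | false => simp [hm, ih]

theorem pv_keys_eq (intervals : List (List (String × Int))) :
    (intervals.foldl (fun s d => (pvKset d).foldl PySem.Set.add s) PySem.Set.empty : PySem.Set Int) =
      PySem.Set.ofList ((pvFlat intervals).map (·.1)) := by
  rw [pv_foldl_nested]
  have h : (pvFlat intervals).map (·.1) = intervals.flatMap pvKset := by
    unfold pvFlat
    rw [List.map_flatMap]
    simp [Function.comp_def]
  rw [h, PySem.Set.ofList_eq_foldl]
  rfl

-- A's per-key bucket is nonempty for every key that occurs
theorem pv_bucket_ne_nil (L : List (Int × (Int × Int))) (k : Int) (hk : k ∈ L.map (·.1)) :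
    (L.filter (fun p => p.1 == k)).map (·.2) ≠ [] := by
  obtain ⟨p, hp, hpk⟩ := List.mem_map.mp hk
  have : p ∈ L.filter (fun p => p.1 == k) := List.mem_filter.mpr ⟨hp, by simp [hpk]⟩
  simp only [ne_eq, List.map_eq_nil_iff]
  exact List.ne_nil_of_mem this

-- ===== VERDICT (by name: the statement is the Claim_ definition above) =====
theorem expand_intervals_py_spec : Claim_equal_expand_intervals_py := by
  intro intervals _
  unfold Spec_expand_intervals_py expand_intervals_py expand_intervals_py_alt
  rw [pv_byday_eq, pv_keys_eq]
  have hnodup : ((pvFlat intervals).foldl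
      (fun bd p => bd.modify p.1 [] (· ++ [p.2])) PySem.Dict.empty).keys.Nodup :=
    PySem.Dict.nodup_keys_foldl_modify_key (pvFlat intervals) Prod.fst []
      (fun _ p => (· ++ [p.2])) PySem.Dict.empty PySem.Dict.nodup_keys_empty
  have hkeys : ((pvFlat intervals).foldl
      (fun bd p => bd.modify p.1 [] (· ++ [p.2])) PySem.Dict.empty).keys =
      PySem.Set.ofList ((pvFlat intervals).map (·.1)) := by
    have h := PySem.Dict.keys_foldl_modify_key (pvFlat intervals) Prod.fst []
      (fun _ p => (· ++ [p.2])) PySem.Dict.empty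
    rw [PySem.Dict.keys_empty, PySem.Set.update_nil_left] at h
    exact h
  have hget : ∀ k : Int, ((pvFlat intervals).foldl
      (fun bd p => bd.modify p.1 [] (· ++ [p.2])) PySem.Dict.empty).getD k [] =
      ((pvFlat intervals).filter (fun p => p.1 == k)).map (·.2) := by
    intro k
    have h := PySem.Dict.getD_foldl_modify_append (pvFlat intervals) PySem.Dict.empty k
    rw [PySem.Dict.getD_empty] at h
    simpa using h
  rw [PySem.Dict.items_eq_map_keys _ hnodup [], hkeys, List.filter_map]
  have hfil : ((PySem.Set.ofList ((pvFlat intervals).map (·.1))).filter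
      ((fun p : Int × List (Int × Int) => !p.2.isEmpty) ∘
        (fun k => (k, ((pvFlat intervals).foldl
          (fun bd p => bd.modify p.1 [] (· ++ [p.2])) PySem.Dict.empty).getD k [])))) =
      PySem.Set.ofList ((pvFlat intervals).map (·.1)) := by
    apply List.filter_eq_self.mpr
    intro k hk
    have hk' : k ∈ (pvFlat intervals).map (·.1) := (PySem.Set.mem_ofList _ _).mp hk
    have hne := pv_bucket_ne_nil (pvFlat intervals) k hk'
    simp only [Function.comp_apply, hget k]
    simpa using hne
  rw [hfil, List.map_map]
  apply List.map_congr_left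
  intro k hk
  simp only [Function.comp_apply, hget k, pv_bucket_eq]
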